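-- pv_equiv track=rewrite | github.com/Rest-ApiUy/Python-Task-Management | fungsi.py | pencarian_rekursif
-- ===== SOURCE A (Python) =====
-- def pencarian_rekursif(list_tugas, kata_kunci, indeks=0, tugas_ditemukan=None):
--     """
--     FUNGSI REKURSIF untuk mencari tugas berdasarkan kata kunci
--     Parameter by value: kata_kunci, indeks
--     Parameter by reference: list_tugas, tugas_ditemukan (list yang diubah)
--     """
--     if tugas_ditemukan is None:
--         tugas_ditemukan = []
--
--     # Base case: jika sudah mencapai akhir list
--     if indeks >= len(list_tugas):
--         return tugas_ditemukan
--
--     # Cek apakah kata_kunci ada dalam judul atau deskripsi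
--     tugas_sekarang = list_tugas[indeks]
--     kata_kunci_kecil = kata_kunci.lower()
--
--     if (kata_kunci_kecil in tugas_sekarang['judul'].lower() or
--         kata_kunci_kecil in tugas_sekarang['deskripsi'].lower()):
--         tugas_ditemukan.append(tugas_sekarang)
--
--     # Recursive case: lanjut ke tugas berikutnya
--     return pencarian_rekursif(list_tugas, kata_kunci, indeks + 1, tugas_ditemukan)
-- ===== SOURCE B (Python) =====
-- def pencarian_rekursif(list_tugas, kata_kunci, indeks=0, tugas_ditemukan=None):
--     """Iterative search: same signature, mutates the passed-in accumulator,
--     honours the starting indeks (negative indices behave as Python indexing)."""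
--     if tugas_ditemukan is None:
--         tugas_ditemukan = []
--     kata_kunci_kecil = kata_kunci.lower()
--     for i in range(indeks, len(list_tugas)):
--         tugas = list_tugas[i]
--         if (kata_kunci_kecil in tugas['judul'].lower() or
--                 kata_kunci_kecil in tugas['deskripsi'].lower()):
--             tugas_ditemukan.append(tugas)
--     return tugas_ditemukan
-- ===== Notes on version B (the rewrite author's own statement) =====
-- stated objective: simpler
-- what changed: Replaces the recursion (one Python frame per element, kata_kunci.lower() recomputed each call) by a single explicit loop over range(indeks, len(list_tugas)) that lowercases the keyword once and appends matches to the same accumulator list.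
import Mathlib
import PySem

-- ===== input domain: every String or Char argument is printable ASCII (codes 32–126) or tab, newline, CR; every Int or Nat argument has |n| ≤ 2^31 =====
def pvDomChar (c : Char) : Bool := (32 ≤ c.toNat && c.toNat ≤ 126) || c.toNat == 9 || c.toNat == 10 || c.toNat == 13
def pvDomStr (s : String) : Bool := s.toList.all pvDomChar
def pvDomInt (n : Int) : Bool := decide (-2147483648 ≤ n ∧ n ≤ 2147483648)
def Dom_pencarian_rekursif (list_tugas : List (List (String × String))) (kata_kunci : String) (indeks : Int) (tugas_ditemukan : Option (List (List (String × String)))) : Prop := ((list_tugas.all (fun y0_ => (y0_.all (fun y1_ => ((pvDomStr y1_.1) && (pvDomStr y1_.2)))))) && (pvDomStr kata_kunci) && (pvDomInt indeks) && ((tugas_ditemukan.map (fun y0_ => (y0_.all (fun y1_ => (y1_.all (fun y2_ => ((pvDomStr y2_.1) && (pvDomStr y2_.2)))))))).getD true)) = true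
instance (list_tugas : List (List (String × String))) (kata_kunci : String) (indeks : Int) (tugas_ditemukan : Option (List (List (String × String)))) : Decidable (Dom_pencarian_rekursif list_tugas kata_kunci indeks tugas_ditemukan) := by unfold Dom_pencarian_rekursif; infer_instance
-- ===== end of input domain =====

-- B replaces A's element-per-call recursion by one explicit loop over range(indeks, len) with the
-- keyword lowercased once (objective: simpler — constant stack, no per-element frame).

-- ===== PORT A =====
-- the Python condition, with Dict lookups totalised by "" (Pre_ excludes the KeyError inputs)
def pvCocok (kata_kunci_kecil : String) (tugas : List (String × String)) : Bool :=
  PySem.Str.isIn kata_kunci_kecil (PySem.Str.lower (PySem.Dict.getD ⟨tugas⟩ "judul" "")) ||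
  PySem.Str.isIn kata_kunci_kecil (PySem.Str.lower (PySem.Dict.getD ⟨tugas⟩ "deskripsi" ""))

-- A's recursion, after the first call has replaced None by []
def pvGoA (list_tugas : List (List (String × String))) (kata_kunci : String) (indeks : Int) (tugas_ditemukan : List (List (String × String))) : List (List (String × String)) :=
  if _h : indeks ≥ (list_tugas.length : Int) then tugas_ditemukan
  else
    let tugas_sekarang := PySem.List.pyGetD list_tugas indeks []   -- none-case totalised; Pre_ excludes IndexError
    let kata_kunci_kecil := PySem.Str.lower kata_kunci
    let acc := if pvCocok kata_kunci_kecil tugas_sekarang then tugas_ditemukan ++ [tugas_sekarang] else tugas_ditemukan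
    pvGoA list_tugas kata_kunci (indeks + 1) acc
termination_by ((list_tugas.length : Int) - indeks).toNat
decreasing_by omega

def pencarian_rekursif (list_tugas : List (List (String × String))) (kata_kunci : String) (indeks : Int) (tugas_ditemukan : Option (List (List (String × String)))) : List (List (String × String)) :=
  let tugas_ditemukan := tugas_ditemukan.getD []   -- "if tugas_ditemukan is None: tugas_ditemukan = []"
  pvGoA list_tugas kata_kunci indeks tugas_ditemukan

-- ===== PORT B =====
def pencarian_rekursif_alt (list_tugas : List (List (String × String))) (kata_kunci : String) (indeks : Int) (tugas_ditemukan : Option (List (List (String × String)))) : List (List (String × String)) :=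
  let acc0 := tugas_ditemukan.getD []
  let kata_kunci_kecil := PySem.Str.lower kata_kunci
  (PySem.List.pyRange indeks (list_tugas.length : Int) 1).foldl
    (fun acc i =>
      let tugas := PySem.List.pyGetD list_tugas i []
      if pvCocok kata_kunci_kecil tugas then acc ++ [tugas] else acc)
    acc0

-- ===== PRECONDITION & SPEC =====
-- Pre_ excludes exactly the inputs where the Python A raises (B raises identically there):
-- indeks below -len(list_tugas) (IndexError), or a visited task dict that lacks the 'judul' key,
-- or lacks 'deskripsi' while its 'judul' does not already contain the keyword (KeyError).
def pvOkDict (kata_kunci : String) (tugas : List (String × String)) : Bool :=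
  match PySem.Dict.get? (⟨tugas⟩ : PySem.Dict String String) "judul" with
  | none => false
  | some j => PySem.Str.isIn (PySem.Str.lower kata_kunci) (PySem.Str.lower j) ||
              (PySem.Dict.get? (⟨tugas⟩ : PySem.Dict String String) "deskripsi").isSome

def Pre_pencarian_rekursif (list_tugas : List (List (String × String))) (kata_kunci : String) (indeks : Int) (tugas_ditemukan : Option (List (List (String × String)))) : Prop :=
  -(list_tugas.length : Int) ≤ indeks ∧
  ∀ tugas ∈ list_tugas.drop (max indeks 0).toNat, pvOkDict kata_kunci tugas = true
instance (list_tugas : List (List (String × String))) (kata_kunci : String) (indeks : Int) (tugas_ditemukan : Option (List (List (String × String)))) : Decidable (Pre_pencarian_rekursif list_tugas kata_kunci indeks tugas_ditemukan) := by unfold Pre_pencarian_rekursif; infer_instance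

def pvWitness_pencarian_rekursif : (List (List (String × String))) × String × Int × (Option (List (List (String × String)))) :=
  ([[("judul", "Beli kopi"), ("deskripsi", "di pasar")], [("judul", "Tidur"), ("deskripsi", "siang")]], "beli", 0, none)

def Spec_pencarian_rekursif (list_tugas : List (List (String × String))) (kata_kunci : String) (indeks : Int) (tugas_ditemukan : Option (List (List (String × String)))) (out : List (List (String × String))) : Prop := out = pencarian_rekursif_alt list_tugas kata_kunci indeks tugas_ditemukan
instance (list_tugas : List (List (String × String))) (kata_kunci : String) (indeks : Int) (tugas_ditemukan : Option (List (List (String × String)))) (out : List (List (String × String))) : Decidable (Spec_pencarian_rekursif list_tugas kata_kunci indeks tugas_ditemukan out) := by unfold Spec_pencarian_rekursif; infer_instance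

-- ===== CLAIM (what is proved, stated in full; the proofs are below) =====
def Claim_equal_pencarian_rekursif : Prop := ∀ (list_tugas : List (List (String × String))) (kata_kunci : String) (indeks : Int) (tugas_ditemukan : Option (List (List (String × String)))), Dom_pencarian_rekursif list_tugas kata_kunci indeks tugas_ditemukan → Pre_pencarian_rekursif list_tugas kata_kunci indeks tugas_ditemukan → Spec_pencarian_rekursif list_tugas kata_kunci indeks tugas_ditemukan (pencarian_rekursif list_tugas kata_kunci indeks tugas_ditemukan)

-- ===== LEMMAS AND PROOFS =====

-- A's recursion from index i equals B's fold over range(i, len) — for any i and accumulator.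
theorem pvGoA_eq_foldl (list_tugas : List (List (String × String))) (kata_kunci : String) (indeks : Int) (acc : List (List (String × String))) :
    pvGoA list_tugas kata_kunci indeks acc =
      (PySem.List.pyRange indeks (list_tugas.length : Int) 1).foldl
        (fun acc i =>
          let tugas := PySem.List.pyGetD list_tugas i []
          if pvCocok (PySem.Str.lower kata_kunci) tugas then acc ++ [tugas] else acc)
        acc := by
  by_cases h : indeks ≥ (list_tugas.length : Int)
  · rw [pvGoA, PySem.List.pyRange_one_eq_nil h]
    simp [h]
  · rw [pvGoA, PySem.List.pyRange_one_cons (by omega)]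
    simp only [h, dite_false]
    rw [pvGoA_eq_foldl]
    simp [List.foldl_cons]
termination_by ((list_tugas.length : Int) - indeks).toNat
decreasing_by omega

-- ===== VERDICT (by name: the statement is the Claim_ definition above) =====
theorem pencarian_rekursif_spec : Claim_equal_pencarian_rekursif := by
  intro list_tugas kata_kunci indeks tugas_ditemukan _ _
  unfold Spec_pencarian_rekursif pencarian_rekursif pencarian_rekursif_alt
  exact pvGoA_eq_foldl list_tugas kata_kunci indeks (tugas_ditemukan.getD [])
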